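-- pv_equiv track=rewrite | github.com/alyssonamaral/generative_graphs | vgae/main.py | is_simple_cycle
-- ===== SOURCE A (Python) =====
-- from typing import List, Tuple, Optional
--
-- def is_connected_undirected(n: int, undirected_edges: List[Tuple[int, int]]) -> bool:
--     if n == 0:
--         return True
--     adj = [[] for _ in range(n)]
--     for u, v in undirected_edges:
--         adj[u].append(v)
--         adj[v].append(u)
--     # começa por um nó com grau > 0
--     start = None
--     for i in range(n):
--         if len(adj[i]) > 0:
--             start = i
--             break
--     if start is None:
--         return n == 1  # grafo trivial
--     seen = [False] * n
--     stack = [start]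
--     seen[start] = True
--     while stack:
--         u = stack.pop()
--         for w in adj[u]:
--             if not seen[w]:
--                 seen[w] = True
--                 stack.append(w)
--     # todos os nós devem ter grau > 0 e serem alcançáveis
--     return all(len(adj[i]) > 0 for i in range(n)) and all(seen[i] for i in range(n))
--
-- def is_simple_cycle(n: int, undirected_edges: List[Tuple[int, int]]) -> bool:
--     if len(undirected_edges) != n:
--         return False
--     deg = [0] * n
--     for u, v in undirected_edges:
--         deg[u] += 1
--         deg[v] += 1
--     if any(d != 2 for d in deg):
--         return False
--     if not is_connected_undirected(n, undirected_edges):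
--         return False
--     return True
-- ===== SOURCE B (Python) =====
-- from typing import List, Tuple
--
-- def is_simple_cycle(n: int, undirected_edges: List[Tuple[int, int]]) -> bool:
--     # A graph is one simple cycle iff |E| == n, every vertex has degree 2,
--     # and the graph is connected.  Connectivity is decided here without any
--     # adjacency list or DFS stack: starting from the mark on vertex 0, we
--     # relax the raw edge list (Bellman-Ford style) until a whole pass changes
--     # nothing; the graph is connected iff every vertex ends up marked.
--     if len(undirected_edges) != n:
--         return False
--     deg = [0] * n
--     for u, v in undirected_edges:
--         deg[u] += 1
--         deg[v] += 1
--     if any(d != 2 for d in deg):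
--         return False
--     if n == 0:
--         return True
--     marks = [False] * n
--     marks[0] = True
--     while True:
--         changed = False
--         for u, v in undirected_edges:
--             if marks[u] and not marks[v]:
--                 marks[v] = True
--                 changed = True
--             if marks[v] and not marks[u]:
--                 marks[u] = True
--                 changed = True
--         if not changed:
--             break
--     return all(marks)
-- ===== Notes on version B (the rewrite author's own statement) =====
-- stated objective: alternative
-- what changed: The adjacency-list + explicit-stack DFS connectivity check is replaced by an edge-list relaxation fixpoint: no adjacency structure is built; marks propagate along the raw edge list until a pass changes nothing, and the graph is connected iff all vertices are marked.
import Mathlib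
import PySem

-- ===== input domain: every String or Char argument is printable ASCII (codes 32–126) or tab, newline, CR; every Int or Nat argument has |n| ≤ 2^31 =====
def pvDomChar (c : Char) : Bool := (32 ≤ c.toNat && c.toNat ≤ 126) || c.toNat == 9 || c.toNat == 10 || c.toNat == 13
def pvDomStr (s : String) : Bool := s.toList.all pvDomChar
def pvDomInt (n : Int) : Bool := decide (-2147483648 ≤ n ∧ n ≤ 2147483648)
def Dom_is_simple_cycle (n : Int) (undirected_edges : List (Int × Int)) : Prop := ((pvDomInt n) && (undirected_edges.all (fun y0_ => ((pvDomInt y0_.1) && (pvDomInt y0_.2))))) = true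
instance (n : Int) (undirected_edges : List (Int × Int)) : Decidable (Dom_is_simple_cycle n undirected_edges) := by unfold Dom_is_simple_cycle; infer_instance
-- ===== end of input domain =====

-- B replaces the adjacency-list + stack DFS connectivity check by an edge-list relaxation
-- fixpoint (no adjacency structure, no stack); alternative algorithm, not claimed faster.

-- ===== PORT A =====
-- deg[u] += 1; deg[v] += 1 over the edge list (this pass is textually shared by A and B)
def pvDegStep (deg : List Int) (p : Int × Int) : List Int :=
  let deg := PySem.List.pySetD deg p.1 (PySem.List.pyGetD deg p.1 0 + 1)
  PySem.List.pySetD deg p.2 (PySem.List.pyGetD deg p.2 0 + 1)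

def pvDeg (n : Int) (edges : List (Int × Int)) : List Int :=
  edges.foldl pvDegStep ((PySem.List.pyRange 0 n).map (fun _ => (0 : Int)))

-- adj[u].append(v); adj[v].append(u)
def pvAdjStep (adj : List (List Int)) (p : Int × Int) : List (List Int) :=
  let adj := PySem.List.pySetD adj p.1 (PySem.List.pyGetD adj p.1 [] ++ [p.2])
  PySem.List.pySetD adj p.2 (PySem.List.pyGetD adj p.2 [] ++ [p.1])

def pvAdj (n : Int) (edges : List (Int × Int)) : List (List Int) :=
  edges.foldl pvAdjStep ((PySem.List.pyRange 0 n).map (fun _ => ([] : List Int)))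

-- for w in adj[u]: if not seen[w]: seen[w] = True; stack.append(w)
-- (stack top at the list head; Python pushes at the end and pops the end — same pop order)
def pvDfsStep (st : List Bool × List Int) (w : Int) : List Bool × List Int :=
  if !(PySem.List.pyGetD st.1 w false) then (PySem.List.pySetD st.1 w true, w :: st.2) else st

-- the while-stack loop; fuel only makes it total (with fuel ≥ |stack| + #unseen it never hits 0, proved below)
def pvDfs (adj : List (List Int)) : Nat → List Bool → List Int → List Bool
  | 0, seen, _ => seen
  | _ + 1, seen, [] => seen
  | f + 1, seen, u :: rest =>
      let st := (PySem.List.pyGetD adj u []).foldl pvDfsStep (seen, rest)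
      pvDfs adj f st.1 st.2

def is_connected_undirected (n : Int) (edges : List (Int × Int)) : Bool :=
  if n = 0 then true
  else
    let adj := pvAdj n edges
    match (PySem.List.pyRange 0 n).find? (fun i => decide (0 < (PySem.List.pyGetD adj i []).length)) with
    | none => decide (n = 1)
    | some s =>
        let seen := PySem.List.pySetD ((PySem.List.pyRange 0 n).map (fun _ => false)) s true
        let seen := pvDfs adj n.toNat seen [s]
        ((PySem.List.pyRange 0 n).all (fun i => decide (0 < (PySem.List.pyGetD adj i []).length))) &&
        ((PySem.List.pyRange 0 n).all (fun i => PySem.List.pyGetD seen i false))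

def is_simple_cycle (n : Int) (undirected_edges : List (Int × Int)) : Bool :=
  if ((undirected_edges.length : Int) ≠ n) then false
  else
    let deg := pvDeg n undirected_edges
    if deg.any (fun d => decide (d ≠ 2)) then false
    else if !(is_connected_undirected n undirected_edges) then false
    else true

-- ===== PORT B =====
-- one relaxation pass over the raw edge list, with a change flag
def pvPassStep (st : List Bool × Bool) (p : Int × Int) : List Bool × Bool :=
  let st := if PySem.List.pyGetD st.1 p.1 false && !(PySem.List.pyGetD st.1 p.2 false)
            then (PySem.List.pySetD st.1 p.2 true, true) else st
  if PySem.List.pyGetD st.1 p.2 false && !(PySem.List.pyGetD st.1 p.1 false)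
  then (PySem.List.pySetD st.1 p.1 true, true) else st

def pvPass (edges : List (Int × Int)) (marks : List Bool) : List Bool × Bool :=
  edges.foldl pvPassStep (marks, false)

-- while True: pass; if not changed: break  — fuel only makes it total
-- (each changing pass marks a new vertex, so fuel = n+1 is never exhausted, proved below)
def pvClosure (edges : List (Int × Int)) : Nat → List Bool → List Bool
  | 0, marks => marks
  | f + 1, marks =>
      let r := pvPass edges marks
      if r.2 then pvClosure edges f r.1 else r.1

def is_simple_cycle_alt (n : Int) (undirected_edges : List (Int × Int)) : Bool :=
  if ((undirected_edges.length : Int) ≠ n) then false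
  else
    let deg := pvDeg n undirected_edges
    if deg.any (fun d => decide (d ≠ 2)) then false
    else if n = 0 then true
    else
      let marks := PySem.List.pySetD ((PySem.List.pyRange 0 n).map (fun _ => false)) 0 true
      let marks := pvClosure undirected_edges (n.toNat + 1) marks
      marks.all id

-- ===== PRECONDITION & SPEC =====
-- Pre_ excludes exactly the inputs where A raises IndexError: len(edges) == n but some
-- edge endpoint lies outside [-n, n) (B raises on the same inputs).
def Pre_is_simple_cycle (n : Int) (undirected_edges : List (Int × Int)) : Prop :=
  (undirected_edges.length : Int) ≠ n ∨
  ∀ p ∈ undirected_edges, (-n ≤ p.1 ∧ p.1 < n) ∧ (-n ≤ p.2 ∧ p.2 < n)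

instance (n : Int) (undirected_edges : List (Int × Int)) : Decidable (Pre_is_simple_cycle n undirected_edges) := by
  unfold Pre_is_simple_cycle; infer_instance

def pvWitness_is_simple_cycle : Int × (List (Int × Int)) := (3, [(0, 1), (1, 2), (2, 0)])

def Spec_is_simple_cycle (n : Int) (undirected_edges : List (Int × Int)) (out : Bool) : Prop := out = is_simple_cycle_alt n undirected_edges
instance (n : Int) (undirected_edges : List (Int × Int)) (out : Bool) : Decidable (Spec_is_simple_cycle n undirected_edges out) := by unfold Spec_is_simple_cycle; infer_instance

-- ===== CLAIM (what is proved, stated in full; the proofs are below) =====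
def Claim_equal_is_simple_cycle : Prop := ∀ (n : Int) (undirected_edges : List (Int × Int)), Dom_is_simple_cycle n undirected_edges → Pre_is_simple_cycle n undirected_edges → Spec_is_simple_cycle n undirected_edges (is_simple_cycle n undirected_edges)

-- ===== LEMMAS AND PROOFS =====

-- index normalisation: the Nat index Python's xs[u] reads for u in [-n, n), |xs| = n
def pvNorm (n u : Int) : Nat := (if u < 0 then u + n else u).toNat

def pvInR (n u : Int) : Prop := -n ≤ u ∧ u < n

def pvSeen (xs : List Bool) (i : Nat) : Prop := xs.getD i false = true

def pvConn (n : Int) (edges : List (Int × Int)) (a b : Nat) : Prop :=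
  ∃ p ∈ edges, (pvNorm n p.1 = a ∧ pvNorm n p.2 = b) ∨ (pvNorm n p.1 = b ∧ pvNorm n p.2 = a)

def pvClosed (n : Int) (edges : List (Int × Int)) (S : Nat → Prop) : Prop :=
  ∀ a b, pvConn n edges a b → S a → S b

def pvT (xs : List Bool) : Nat := xs.count true

lemma pvNorm_lt {n u : Int} (h : pvInR n u) : pvNorm n u < n.toNat := by
  rcases h with ⟨h1, h2⟩; unfold pvNorm; split <;> omega

lemma pvNorm_zero {n : Int} : pvNorm n 0 = 0 := by unfold pvNorm; simp

lemma pvGetD_norm {α : Type} {n u : Int} (xs : List α) (d : α)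
    (hlen : xs.length = n.toNat) (h : pvInR n u) :
    PySem.List.pyGetD xs u d = xs.getD (pvNorm n u) d := by
  rcases h with ⟨h1, h2⟩
  by_cases hu : 0 ≤ u
  · have hnorm : pvNorm n u = u.toNat := by unfold pvNorm; rw [if_neg (by omega)]
    simp only [PySem.List.pyGetD, PySem.List.pyGet?, PySem.List.pyIdx?, hlen, hnorm,
      List.getD_eq_getElem?_getD, if_pos hu, if_pos (show u < (n.toNat : Int) by omega)]
    simp
  · have hnorm : pvNorm n u = n.toNat - (-u).toNat := by
      unfold pvNorm; rw [if_pos (by omega)]; omega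
    simp only [PySem.List.pyGetD, PySem.List.pyGet?, PySem.List.pyIdx?, hlen, hnorm,
      List.getD_eq_getElem?_getD, if_neg hu, if_pos (show -(n.toNat : Int) ≤ u by omega)]
    simp

lemma pvSetD_norm {α : Type} {n u : Int} (xs : List α) (v : α)
    (hlen : xs.length = n.toNat) (h : pvInR n u) :
    PySem.List.pySetD xs u v = xs.set (pvNorm n u) v := by
  rcases h with ⟨h1, h2⟩
  by_cases hu : 0 ≤ u
  · have hnorm : pvNorm n u = u.toNat := by unfold pvNorm; rw [if_neg (by omega)]
    simp only [PySem.List.pySetD, PySem.List.pySet?, PySem.List.pyIdx?, hlen, hnorm,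
      if_pos hu, if_pos (show u < (n.toNat : Int) by omega)]
    simp
  · have hnorm : pvNorm n u = n.toNat - (-u).toNat := by
      unfold pvNorm; rw [if_pos (by omega)]; omega
    simp only [PySem.List.pySetD, PySem.List.pySet?, PySem.List.pyIdx?, hlen, hnorm,
      if_neg hu, if_pos (show -(n.toNat : Int) ≤ u by omega)]
    simp

lemma pv_getD_set {α : Type} (xs : List α) (j i : Nat) (v d : α) :
    (xs.set j v).getD i d = if j = i ∧ j < xs.length then v else xs.getD i d := by
  simp only [List.getD_eq_getElem?_getD, List.getElem?_set]
  split_ifs with h1 h2 h3 <;> simp_all <;> omega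

lemma pvT_le (xs : List Bool) : pvT xs ≤ xs.length := List.count_le_length

lemma pvT_set_new {xs : List Bool} {j : Nat} (hj : j < xs.length)
    (h : xs.getD j false = false) : pvT (xs.set j true) = pvT xs + 1 := by
  have := List.count_set (a := true) (b := true) (l := xs) (i := j) hj
  have hx : xs[j] = false := by
    rw [List.getD_eq_getElem?_getD, List.getElem?_eq_getElem hj] at h; simpa using h
  rw [pvT, pvT, this, hx]
  have : List.count true xs ≤ xs.length := List.count_le_length
  simp

-- the all-false initial list reads false at EVERY index
lemma pvFalses_getD (n : Int) (i : Nat) :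
    (((PySem.List.pyRange 0 n).map (fun _ => false)).getD i false) = false := by
  rw [List.getD_eq_getElem?_getD, List.getElem?_map]
  cases (PySem.List.pyRange 0 n)[i]? <;> simp

lemma pvLen_pyRange (n : Int) : (PySem.List.pyRange 0 n).length = n.toNat := by
  simp [PySem.List.pyRange]
  intro h; omega

lemma pvConst_getD {α : Type} (n : Int) (c : α) (i : Nat) :
    (((PySem.List.pyRange 0 n).map (fun _ => c)).getD i c) = c := by
  rw [List.getD_eq_getElem?_getD, List.getElem?_map]
  cases (PySem.List.pyRange 0 n)[i]? <;> simp

-- ## lengths of the folded state lists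
lemma pvDegFold_length (es : List (Int × Int)) (acc : List Int) :
    (es.foldl pvDegStep acc).length = acc.length := by
  induction es generalizing acc with
  | nil => rfl
  | cons p es ih => rw [List.foldl_cons, ih, pvDegStep]; simp [PySem.List.length_pySetD]

lemma pvAdjFold_length (es : List (Int × Int)) (acc : List (List Int)) :
    (es.foldl pvAdjStep acc).length = acc.length := by
  induction es generalizing acc with
  | nil => rfl
  | cons p es ih => rw [List.foldl_cons, ih, pvAdjStep]; simp [PySem.List.length_pySetD]

lemma pvDeg_length (n : Int) (edges : List (Int × Int)) :
    (pvDeg n edges).length = n.toNat := by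
  rw [pvDeg, pvDegFold_length, List.length_map, pvLen_pyRange n]

lemma pvAdj_length (n : Int) (edges : List (Int × Int)) :
    (pvAdj n edges).length = n.toNat := by
  rw [pvAdj, pvAdjFold_length, List.length_map, pvLen_pyRange n]

-- ## characterisation of the adjacency lists
lemma pvAdjFold_mem {n : Int} (es : List (Int × Int)) (acc : List (List Int))
    (hacc : acc.length = n.toNat)
    (hr : ∀ p ∈ es, pvInR n p.1 ∧ pvInR n p.2) (a : Nat) (ha : a < n.toNat) (w : Int) :
    w ∈ (es.foldl pvAdjStep acc).getD a [] ↔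
      w ∈ acc.getD a [] ∨
      ∃ p ∈ es, (pvNorm n p.1 = a ∧ p.2 = w) ∨ (pvNorm n p.2 = a ∧ p.1 = w) := by
  induction es generalizing acc with
  | nil => simp
  | cons p es ih =>
    obtain ⟨hp1, hp2⟩ := hr p (List.mem_cons_self ..)
    have l1 : pvNorm n p.1 < n.toNat := pvNorm_lt hp1
    have l2 : pvNorm n p.2 < n.toNat := pvNorm_lt hp2
    have hstep : (pvAdjStep acc p).length = n.toNat := by
      unfold pvAdjStep; simp [PySem.List.length_pySetD, hacc]
    have key : ∀ x, x ∈ (pvAdjStep acc p).getD a [] ↔ x ∈ acc.getD a [] ∨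
        ((pvNorm n p.1 = a ∧ p.2 = x) ∨ (pvNorm n p.2 = a ∧ p.1 = x)) := by
      intro x
      unfold pvAdjStep
      dsimp only
      rw [pvGetD_norm _ _ hacc hp1, pvSetD_norm _ _ hacc hp1]
      have hl1 : (acc.set (pvNorm n p.1) (acc.getD (pvNorm n p.1) [] ++ [p.2])).length
          = n.toNat := by simp [hacc]
      rw [pvGetD_norm _ _ hl1 hp2, pvSetD_norm _ _ hl1 hp2]
      simp only [pv_getD_set, List.length_set, hacc, l1, l2, and_true]
      split_ifs with c1 c2 c3 <;>
        simp_all [List.mem_append] <;> tauto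
    rw [List.foldl_cons, ih (pvAdjStep acc p) hstep
      (fun q hq => hr q (List.mem_cons_of_mem _ hq)), key]
    simp only [List.mem_cons]
    constructor
    · rintro ((h | h) | ⟨q, hq, hh⟩)
      exacts [Or.inl h, Or.inr ⟨p, Or.inl rfl, h⟩, Or.inr ⟨q, Or.inr hq, hh⟩]
    · rintro (h | ⟨q, (rfl | hq), hh⟩)
      exacts [Or.inl (Or.inl h), Or.inl (Or.inr hh), Or.inr ⟨q, hq, hh⟩]

lemma pvAdj_mem {n : Int} {edges : List (Int × Int)}
    (hr : ∀ p ∈ edges, pvInR n p.1 ∧ pvInR n p.2) (a : Nat) (ha : a < n.toNat) (w : Int) :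
    w ∈ (pvAdj n edges).getD a [] ↔
      ∃ p ∈ edges, (pvNorm n p.1 = a ∧ p.2 = w) ∨ (pvNorm n p.2 = a ∧ p.1 = w) := by
  rw [pvAdj, pvAdjFold_mem _ _ (by rw [List.length_map, pvLen_pyRange]) hr a ha w, pvConst_getD]
  simp

-- every adjacency entry is an edge endpoint (so in range) and conn-related to its bucket
lemma pvAdj_mem_conn {n : Int} {edges : List (Int × Int)}
    (hr : ∀ p ∈ edges, pvInR n p.1 ∧ pvInR n p.2) (a : Nat) (ha : a < n.toNat) (w : Int)
    (hw : w ∈ (pvAdj n edges).getD a []) :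
    pvInR n w ∧ pvConn n edges a (pvNorm n w) := by
  rw [pvAdj_mem hr a ha w] at hw
  obtain ⟨p, hp, h⟩ := hw
  obtain ⟨hq1, hq2⟩ := hr p hp
  rcases h with ⟨h1, h2⟩ | ⟨h1, h2⟩
  · exact ⟨h2 ▸ hq2, ⟨p, hp, Or.inl ⟨h1, by rw [h2]⟩⟩⟩
  · exact ⟨h2 ▸ hq1, ⟨p, hp, Or.inr ⟨by rw [h2], h1⟩⟩⟩

lemma pvAdj_conn_mem {n : Int} {edges : List (Int × Int)}
    (hr : ∀ p ∈ edges, pvInR n p.1 ∧ pvInR n p.2) (a b : Nat) (ha : a < n.toNat)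
    (hc : pvConn n edges a b) :
    ∃ w ∈ (pvAdj n edges).getD a [], pvNorm n w = b := by
  rcases hc with ⟨p, hp, ⟨h1, h2⟩ | ⟨h1, h2⟩⟩
  · exact ⟨p.2, (pvAdj_mem hr a ha p.2).2 ⟨p, hp, Or.inl ⟨h1, rfl⟩⟩, h2⟩
  · exact ⟨p.1, (pvAdj_mem hr a ha p.1).2 ⟨p, hp, Or.inr ⟨h2, rfl⟩⟩, h1⟩

-- ## degree/adjacency relation: deg[i] = |adj[i]|
lemma pvDegAdjFold {n : Int} (es : List (Int × Int)) (accd : List Int) (acca : List (List Int))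
    (hld : accd.length = n.toNat) (hla : acca.length = n.toNat)
    (hr : ∀ p ∈ es, pvInR n p.1 ∧ pvInR n p.2)
    (hpt : ∀ i < n.toNat, accd.getD i 0 = ((acca.getD i []).length : Int)) :
    ∀ i < n.toNat, (es.foldl pvDegStep accd).getD i 0
      = (((es.foldl pvAdjStep acca).getD i []).length : Int) := by
  induction es generalizing accd acca with
  | nil => exact hpt
  | cons p es ih =>
    obtain ⟨hp1, hp2⟩ := hr p (List.mem_cons_self ..)
    have l1 : pvNorm n p.1 < n.toNat := pvNorm_lt hp1
    have l2 : pvNorm n p.2 < n.toNat := pvNorm_lt hp2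
    refine ih (pvDegStep accd p) (pvAdjStep acca p) ?_ ?_
      (fun q hq => hr q (List.mem_cons_of_mem _ hq)) ?_
    · unfold pvDegStep; simp [PySem.List.length_pySetD, hld]
    · unfold pvAdjStep; simp [PySem.List.length_pySetD, hla]
    · intro i hi
      unfold pvDegStep pvAdjStep
      dsimp only
      rw [pvGetD_norm _ _ hld hp1, pvSetD_norm _ _ hld hp1,
          pvGetD_norm _ _ hla hp1, pvSetD_norm _ _ hla hp1]
      have hld1 : (accd.set (pvNorm n p.1) (accd.getD (pvNorm n p.1) 0 + 1)).length
          = n.toNat := by simp [hld]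
      have hla1 : (acca.set (pvNorm n p.1) (acca.getD (pvNorm n p.1) [] ++ [p.2])).length
          = n.toNat := by simp [hla]
      rw [pvGetD_norm _ _ hld1 hp2, pvSetD_norm _ _ hld1 hp2,
          pvGetD_norm _ _ hla1 hp2, pvSetD_norm _ _ hla1 hp2]
      simp only [pv_getD_set, List.length_set, hld, hla, l1, l2, and_true]
      have e1 := hpt (pvNorm n p.1) l1
      have e2 := hpt (pvNorm n p.2) l2
      have ei := hpt i hi
      split_ifs <;> simp_all [List.length_append] <;> omega

lemma pvDegAdj {n : Int} {edges : List (Int × Int)}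
    (hr : ∀ p ∈ edges, pvInR n p.1 ∧ pvInR n p.2) (i : Nat) (hi : i < n.toNat) :
    (pvDeg n edges).getD i 0 = (((pvAdj n edges).getD i []).length : Int) := by
  rw [pvDeg, pvAdj]
  exact pvDegAdjFold edges _ _ (by rw [List.length_map, pvLen_pyRange]) (by rw [List.length_map, pvLen_pyRange]) hr
    (fun j hj => by rw [pvConst_getD, pvConst_getD]; simp) i hi

-- ## the inner DFS fold (processing adj[u])
lemma pvDfsFold {n : Int} (ws : List Int) (seen : List Bool) (rest : List Int)
    (hlen : seen.length = n.toNat) (hws : ∀ w ∈ ws, pvInR n w) :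
    (ws.foldl pvDfsStep (seen, rest)).1.length = n.toNat ∧
    (∀ i, pvSeen seen i → pvSeen (ws.foldl pvDfsStep (seen, rest)).1 i) ∧
    (∀ i, pvSeen (ws.foldl pvDfsStep (seen, rest)).1 i →
      pvSeen seen i ∨ ∃ x, x ∈ (ws.foldl pvDfsStep (seen, rest)).2 ∧ x ∈ ws ∧ pvNorm n x = i) ∧
    (∀ w ∈ ws, pvSeen (ws.foldl pvDfsStep (seen, rest)).1 (pvNorm n w)) ∧
    (∀ x ∈ (ws.foldl pvDfsStep (seen, rest)).2, x ∈ rest ∨ x ∈ ws) ∧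
    (∀ x ∈ rest, x ∈ (ws.foldl pvDfsStep (seen, rest)).2) ∧
    pvT (ws.foldl pvDfsStep (seen, rest)).1 + rest.length
      = pvT seen + (ws.foldl pvDfsStep (seen, rest)).2.length := by
  induction ws generalizing seen rest with
  | nil =>
    exact ⟨hlen, fun i h => h, fun i h => Or.inl h, by simp, fun x hx => Or.inl hx,
      fun x hx => hx, rfl⟩
  | cons w ws ih =>
    have hw : pvInR n w := hws w (List.mem_cons_self ..)
    have hwlt : pvNorm n w < n.toNat := pvNorm_lt hw
    rw [List.foldl_cons]
    by_cases hseen : PySem.List.pyGetD seen w false = true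
    · have hstep : pvDfsStep (seen, rest) w = (seen, rest) := by
        unfold pvDfsStep; rw [if_neg (by simp [hseen])]
      rw [hstep]
      obtain ⟨c1, c2, c3, c4, c5, c6, c7⟩ :=
        ih seen rest hlen (fun x hx => hws x (List.mem_cons_of_mem _ hx))
      refine ⟨c1, c2, ?_, ?_, ?_, c6, c7⟩
      · intro i h
        rcases c3 i h with h | ⟨x, hx1, hx2, hx3⟩
        · exact Or.inl h
        · exact Or.inr ⟨x, hx1, List.mem_cons_of_mem _ hx2, hx3⟩
      · intro x hx
        rcases List.mem_cons.1 hx with rfl | hx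
        · refine c2 _ ?_
          unfold pvSeen
          rw [← pvGetD_norm _ _ hlen hw]
          exact hseen
        · exact c4 x hx
      · intro x hx
        rcases c5 x hx with h | h
        · exact Or.inl h
        · exact Or.inr (List.mem_cons_of_mem _ h)
    · have hstep : pvDfsStep (seen, rest) w = (seen.set (pvNorm n w) true, w :: rest) := by
        unfold pvDfsStep
        rw [if_pos (by simp [Bool.eq_false_iff.2 hseen] : (!(PySem.List.pyGetD seen w false)) = true)]
        dsimp only
        rw [pvSetD_norm _ _ hlen hw]
      rw [hstep]
      have hlen1 : (seen.set (pvNorm n w) true).length = n.toNat := by simp [hlen]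
      obtain ⟨c1, c2, c3, c4, c5, c6, c7⟩ :=
        ih (seen.set (pvNorm n w) true) (w :: rest) hlen1
          (fun x hx => hws x (List.mem_cons_of_mem _ hx))
      have hmono1 : ∀ i, pvSeen seen i → pvSeen (seen.set (pvNorm n w) true) i := by
        intro i h
        unfold pvSeen at h ⊢
        rw [pv_getD_set]
        split_ifs with hc
        · rfl
        · exact h
      have hnew1 : ∀ i, pvSeen (seen.set (pvNorm n w) true) i →
          pvSeen seen i ∨ i = pvNorm n w := by
        intro i h
        unfold pvSeen at h ⊢
        rw [pv_getD_set] at h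
        by_cases hc : pvNorm n w = i
        · exact Or.inr hc.symm
        · rw [if_neg (by tauto)] at h; exact Or.inl h
      have hwseen1 : pvSeen (seen.set (pvNorm n w) true) (pvNorm n w) := by
        unfold pvSeen
        rw [pv_getD_set, if_pos ⟨rfl, by omega⟩]
      have hTset : pvT (seen.set (pvNorm n w) true) = pvT seen + 1 := by
        refine pvT_set_new (by omega) ?_
        rw [← pvGetD_norm _ _ hlen hw]
        exact Bool.eq_false_iff.2 hseen
      refine ⟨c1, fun i h => c2 i (hmono1 i h), ?_, ?_, ?_, ?_, ?_⟩
      · intro i h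
        rcases c3 i h with h | ⟨x, hx1, hx2, hx3⟩
        · rcases hnew1 i h with h | rfl
          · exact Or.inl h
          · exact Or.inr ⟨w, c6 w (List.mem_cons_self ..), List.mem_cons_self .., rfl⟩
        · exact Or.inr ⟨x, hx1, List.mem_cons_of_mem _ hx2, hx3⟩
      · intro x hx
        rcases List.mem_cons.1 hx with rfl | hx
        · exact c2 _ hwseen1
        · exact c4 x hx
      · intro x hx
        rcases c5 x hx with h | h
        · rcases List.mem_cons.1 h with rfl | h
          · exact Or.inr (List.mem_cons_self ..)
          · exact Or.inl h
        · exact Or.inr (List.mem_cons_of_mem _ h)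
      · exact fun x hx => c6 x (List.mem_cons_of_mem _ hx)
      · rw [hTset] at c7
        simp only [List.length_cons] at c7
        omega

-- ## the DFS while-loop: monotone, closed at exit, minimal, and total with the stated fuel
lemma pvDfs_main {n : Int} {edges : List (Int × Int)}
    (hr : ∀ p ∈ edges, pvInR n p.1 ∧ pvInR n p.2) :
    ∀ (fuel : Nat) (seen : List Bool) (stack : List Int),
    seen.length = n.toNat →
    (∀ u ∈ stack, pvInR n u ∧ pvSeen seen (pvNorm n u)) →
    (∀ a, pvSeen seen a →
      (∃ u ∈ stack, pvNorm n u = a) ∨ ∀ b, pvConn n edges a b → pvSeen seen b) →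
    stack.length + (n.toNat - pvT seen) ≤ fuel →
    ((pvDfs (pvAdj n edges) fuel seen stack).length = n.toNat ∧
     (∀ i, pvSeen seen i → pvSeen (pvDfs (pvAdj n edges) fuel seen stack) i) ∧
     pvClosed n edges (pvSeen (pvDfs (pvAdj n edges) fuel seen stack)) ∧
     (∀ S, pvClosed n edges S → (∀ i, pvSeen seen i → S i) →
        ∀ i, pvSeen (pvDfs (pvAdj n edges) fuel seen stack) i → S i)) := by
  intro fuel
  induction fuel with
  | zero =>
    intro seen stack hlen hstack hinv hmeas
    match stack, hmeas with
    | [], _ =>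
      refine ⟨hlen, fun i h => h, ?_, fun S hS hsub i h => hsub i h⟩
      intro a b hab ha
      rcases hinv a ha with ⟨u, hu, _⟩ | h
      · exact absurd hu (List.not_mem_nil)
      · exact h b hab
    | u :: rest, hmeas => simp at hmeas
  | succ f ihf =>
    intro seen stack hlen hstack hinv hmeas
    match stack with
    | [] =>
      refine ⟨hlen, fun i h => h, ?_, fun S hS hsub i h => hsub i h⟩
      intro a b hab ha
      rcases hinv a ha with ⟨u, hu, _⟩ | h
      · exact absurd hu (List.not_mem_nil)
      · exact h b hab
    | u :: rest =>
      obtain ⟨huR, huS⟩ := hstack u (List.mem_cons_self ..)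
      have hult : pvNorm n u < n.toNat := pvNorm_lt huR
      have hgA : PySem.List.pyGetD (pvAdj n edges) u []
          = (pvAdj n edges).getD (pvNorm n u) [] :=
        pvGetD_norm _ _ (pvAdj_length n edges) huR
      have hws : ∀ w ∈ (pvAdj n edges).getD (pvNorm n u) [], pvInR n w :=
        fun w hw => (pvAdj_mem_conn hr (pvNorm n u) hult w hw).1
      obtain ⟨c1, c2, c3, c4, c5, c6, c7⟩ :=
        pvDfsFold (n := n) ((pvAdj n edges).getD (pvNorm n u) []) seen rest hlen hws
      show ((pvDfs (pvAdj n edges) (f + 1) seen (u :: rest)).length = n.toNat ∧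
        (∀ i, pvSeen seen i → pvSeen (pvDfs (pvAdj n edges) (f + 1) seen (u :: rest)) i) ∧ _ ∧ _)
      simp only [pvDfs, hgA]
      set st := ((pvAdj n edges).getD (pvNorm n u) []).foldl pvDfsStep (seen, rest) with hst
      have hstack' : ∀ x ∈ st.2, pvInR n x ∧ pvSeen st.1 (pvNorm n x) := by
        intro x hx
        rcases c5 x hx with h | h
        · obtain ⟨h1, h2⟩ := hstack x (List.mem_cons_of_mem _ h)
          exact ⟨h1, c2 _ h2⟩
        · exact ⟨hws x h, c4 x h⟩
      have hinv' : ∀ a, pvSeen st.1 a →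
          (∃ x ∈ st.2, pvNorm n x = a) ∨ ∀ b, pvConn n edges a b → pvSeen st.1 b := by
        intro a ha
        rcases c3 a ha with hold | ⟨x, hx1, hx2, hx3⟩
        · rcases hinv a hold with ⟨u', hu', hn'⟩ | hcl
          · rcases List.mem_cons.1 hu' with rfl | hu'
            · right
              intro b hb
              obtain ⟨w, hw, hwb⟩ := pvAdj_conn_mem hr a b (hn' ▸ hult) hb
              rw [← hn'] at hw
              exact hwb ▸ c4 w hw
            · exact Or.inl ⟨u', c6 u' hu', hn'⟩
          · exact Or.inr fun b hb => c2 b (hcl b hb)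
        · exact Or.inl ⟨x, hx1, hx3⟩
      have hTle : pvT st.1 ≤ n.toNat := c1 ▸ pvT_le st.1
      have hTle0 : pvT seen ≤ n.toNat := hlen ▸ pvT_le seen
      have hmeas' : st.2.length + (n.toNat - pvT st.1) ≤ f := by
        simp only [List.length_cons] at hmeas
        omega
      obtain ⟨m0, m1, m2, m3⟩ := ihf st.1 st.2 c1 hstack' hinv' hmeas'
      refine ⟨m0, fun i h => m1 i (c2 i h), m2, ?_⟩
      intro S hS hsub i h
      refine m3 S hS ?_ i h
      intro j hj
      rcases c3 j hj with hold | ⟨x, _, hx2, hx3⟩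
      · exact hsub j hold
      · have := (pvAdj_mem_conn hr (pvNorm n u) hult x hx2).2
        exact hx3 ▸ hS _ _ this (hsub _ huS)

-- ## one relaxation pass of B
lemma pvPassFold {n : Int} {edges : List (Int × Int)} (es : List (Int × Int))
    (marks : List Bool) (c : Bool)
    (hsub : ∀ p ∈ es, p ∈ edges)
    (hr : ∀ p ∈ es, pvInR n p.1 ∧ pvInR n p.2)
    (hlen : marks.length = n.toNat) :
    (es.foldl pvPassStep (marks, c)).1.length = n.toNat ∧
    (∀ i, pvSeen marks i → pvSeen (es.foldl pvPassStep (marks, c)).1 i) ∧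
    (∀ S, pvClosed n edges S → (∀ i, pvSeen marks i → S i) →
      ∀ i, pvSeen (es.foldl pvPassStep (marks, c)).1 i → S i) ∧
    (c = true → (es.foldl pvPassStep (marks, c)).2 = true) ∧
    pvT marks ≤ pvT (es.foldl pvPassStep (marks, c)).1 ∧
    ((es.foldl pvPassStep (marks, c)).2 = true →
      c = true ∨ pvT marks < pvT (es.foldl pvPassStep (marks, c)).1) ∧
    ((es.foldl pvPassStep (marks, c)).2 = false →
      (es.foldl pvPassStep (marks, c)).1 = marks ∧
      ∀ p ∈ es, (pvSeen marks (pvNorm n p.1) ↔ pvSeen marks (pvNorm n p.2))) := by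
  induction es generalizing marks c with
  | nil =>
    exact ⟨hlen, fun i h => h, fun S _ hsub i h => hsub i h, fun h => h, le_refl _,
      fun h => Or.inl h, fun _ => ⟨rfl, by simp⟩⟩
  | cons p es ih =>
    obtain ⟨hp1, hp2⟩ := hr p (List.mem_cons_self ..)
    have l1 : pvNorm n p.1 < n.toNat := pvNorm_lt hp1
    have l2 : pvNorm n p.2 < n.toNat := pvNorm_lt hp2
    have g1 : PySem.List.pyGetD marks p.1 false = marks.getD (pvNorm n p.1) false :=
      pvGetD_norm _ _ hlen hp1
    have g2 : PySem.List.pyGetD marks p.2 false = marks.getD (pvNorm n p.2) false :=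
      pvGetD_norm _ _ hlen hp2
    have hsub' : ∀ q ∈ es, q ∈ edges := fun q hq => hsub q (List.mem_cons_of_mem _ hq)
    have hr' : ∀ q ∈ es, pvInR n q.1 ∧ pvInR n q.2 :=
      fun q hq => hr q (List.mem_cons_of_mem _ hq)
    have hpe : p ∈ edges := hsub p (List.mem_cons_self ..)
    rw [List.foldl_cons]
    by_cases hb1 : marks.getD (pvNorm n p.1) false = true ∧
        marks.getD (pvNorm n p.2) false = false
    · -- the u→v branch fires; the v→u branch then cannot
      have hc1 : (PySem.List.pyGetD marks p.1 false && !PySem.List.pyGetD marks p.2 false)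
          = true := by rw [g1, g2, hb1.1, hb1.2]; rfl
      have hlen1 : (marks.set (pvNorm n p.2) true).length = n.toNat := by simp [hlen]
      have hg1' : PySem.List.pyGetD (marks.set (pvNorm n p.2) true) p.1 false
          = (marks.set (pvNorm n p.2) true).getD (pvNorm n p.1) false :=
        pvGetD_norm _ _ hlen1 hp1
      have hone : (marks.set (pvNorm n p.2) true).getD (pvNorm n p.1) false = true := by
        rw [pv_getD_set]
        by_cases hc : pvNorm n p.2 = pvNorm n p.1
        · rw [if_pos ⟨hc, by omega⟩]
        · rw [if_neg (by tauto)]; exact hb1.1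
      have hstep : pvPassStep (marks, c) p = (marks.set (pvNorm n p.2) true, true) := by
        unfold pvPassStep
        dsimp only
        rw [if_pos hc1]
        dsimp only
        rw [pvSetD_norm _ _ hlen hp2]
        rw [if_neg (by rw [hg1', hone]; simp)]
      rw [hstep]
      set m1 := marks.set (pvNorm n p.2) true with hm1
      have hmono1 : ∀ i, pvSeen marks i → pvSeen m1 i := by
        intro i h
        unfold pvSeen at h ⊢
        rw [hm1, pv_getD_set]
        split_ifs
        · rfl
        · exact h
      have hnew1 : ∀ i, pvSeen m1 i → pvSeen marks i ∨ i = pvNorm n p.2 := by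
        intro i h
        unfold pvSeen at h ⊢
        rw [hm1, pv_getD_set] at h
        by_cases hc : pvNorm n p.2 = i
        · exact Or.inr hc.symm
        · rw [if_neg (by tauto)] at h; exact Or.inl h
      have hT1 : pvT m1 = pvT marks + 1 := pvT_set_new (by omega) hb1.2
      obtain ⟨c1, c2, c3, c4, c5, c6, c7⟩ := ih m1 true hsub' hr' hlen1
      refine ⟨c1, fun i h => c2 i (hmono1 i h), ?_, fun _ => c4 rfl, by omega, ?_, ?_⟩
      · intro S hS hsubS i h
        refine c3 S hS ?_ i h
        intro j hj
        rcases hnew1 j hj with hj | rfl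
        · exact hsubS j hj
        · exact hS _ _ ⟨p, hpe, Or.inl ⟨rfl, rfl⟩⟩ (hsubS _ hb1.1)
      · intro _
        right
        omega
      · intro h
        rw [c4 rfl] at h
        cases h
    · by_cases hb2 : marks.getD (pvNorm n p.2) false = true ∧
          marks.getD (pvNorm n p.1) false = false
      · -- only the v→u branch fires
        have hc1f : (PySem.List.pyGetD marks p.1 false && !PySem.List.pyGetD marks p.2 false)
            = false := by rw [g1, hb2.2]; rfl
        have hc2 : (PySem.List.pyGetD marks p.2 false && !PySem.List.pyGetD marks p.1 false)
            = true := by rw [g1, g2, hb2.1, hb2.2]; rfl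
        have hstep : pvPassStep (marks, c) p = (marks.set (pvNorm n p.1) true, true) := by
          unfold pvPassStep
          dsimp only
          rw [if_neg (c := (PySem.List.pyGetD marks p.1 false &&
            !PySem.List.pyGetD marks p.2 false) = true) (by rw [hc1f]; simp)]
          dsimp only
          rw [if_pos hc2, pvSetD_norm _ _ hlen hp1]
        rw [hstep]
        set m1 := marks.set (pvNorm n p.1) true with hm1
        have hlen1 : m1.length = n.toNat := by simp [hm1, hlen]
        have hmono1 : ∀ i, pvSeen marks i → pvSeen m1 i := by
          intro i h
          unfold pvSeen at h ⊢
          rw [hm1, pv_getD_set]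
          split_ifs
          · rfl
          · exact h
        have hnew1 : ∀ i, pvSeen m1 i → pvSeen marks i ∨ i = pvNorm n p.1 := by
          intro i h
          unfold pvSeen at h ⊢
          rw [hm1, pv_getD_set] at h
          by_cases hc : pvNorm n p.1 = i
          · exact Or.inr hc.symm
          · rw [if_neg (by tauto)] at h; exact Or.inl h
        have hT1 : pvT m1 = pvT marks + 1 := pvT_set_new (by omega) hb2.2
        obtain ⟨c1, c2, c3, c4, c5, c6, c7⟩ := ih m1 true hsub' hr' hlen1
        refine ⟨c1, fun i h => c2 i (hmono1 i h), ?_, fun _ => c4 rfl, by omega, ?_, ?_⟩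
        · intro S hS hsubS i h
          refine c3 S hS ?_ i h
          intro j hj
          rcases hnew1 j hj with hj | rfl
          · exact hsubS j hj
          · exact hS _ _ ⟨p, hpe, Or.inr ⟨rfl, rfl⟩⟩ (hsubS _ hb2.1)
        · intro _
          right
          omega
        · intro h
          rw [c4 rfl] at h
          cases h
      · -- neither branch fires: the edge is already saturated
        have hiff : (marks.getD (pvNorm n p.1) false = true ↔
            marks.getD (pvNorm n p.2) false = true) := by
          constructor <;> intro h
          · by_contra hc
            exact hb1 ⟨h, by simpa using Bool.eq_false_iff.2 hc⟩
          · by_contra hc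
            exact hb2 ⟨h, by simpa using Bool.eq_false_iff.2 hc⟩
        have hc1f : (PySem.List.pyGetD marks p.1 false && !PySem.List.pyGetD marks p.2 false)
            = false := by
          rw [g1, g2]
          cases h1 : marks.getD (pvNorm n p.1) false <;>
            cases h2 : marks.getD (pvNorm n p.2) false <;> simp_all
        have hc2f : (PySem.List.pyGetD marks p.2 false && !PySem.List.pyGetD marks p.1 false)
            = false := by
          rw [g1, g2]
          cases h1 : marks.getD (pvNorm n p.1) false <;>
            cases h2 : marks.getD (pvNorm n p.2) false <;> simp_all
        have hstep : pvPassStep (marks, c) p = (marks, c) := by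
          unfold pvPassStep
          dsimp only
          rw [if_neg (c := (PySem.List.pyGetD marks p.1 false &&
            !PySem.List.pyGetD marks p.2 false) = true) (by rw [hc1f]; simp)]
          dsimp only
          rw [if_neg (by rw [hc2f]; simp)]
        rw [hstep]
        obtain ⟨c1, c2, c3, c4, c5, c6, c7⟩ := ih marks c hsub' hr' hlen
        refine ⟨c1, c2, c3, c4, c5, c6, ?_⟩
        intro h
        obtain ⟨he, hall⟩ := c7 h
        refine ⟨he, ?_⟩
        intro q hq
        rcases List.mem_cons.1 hq with rfl | hq
        · exact hiff
        · exact hall q hq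

-- ## B's fixpoint loop: monotone, closed, minimal, total with fuel > n - |marks|
lemma pvClosure_main {n : Int} {edges : List (Int × Int)}
    (hr : ∀ p ∈ edges, pvInR n p.1 ∧ pvInR n p.2) :
    ∀ (fuel : Nat) (marks : List Bool),
    marks.length = n.toNat →
    n.toNat - pvT marks < fuel →
    ((pvClosure edges fuel marks).length = n.toNat ∧
     (∀ i, pvSeen marks i → pvSeen (pvClosure edges fuel marks) i) ∧
     pvClosed n edges (pvSeen (pvClosure edges fuel marks)) ∧
     (∀ S, pvClosed n edges S → (∀ i, pvSeen marks i → S i) →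
        ∀ i, pvSeen (pvClosure edges fuel marks) i → S i)) := by
  intro fuel
  induction fuel with
  | zero =>
    intro marks _ hfuel
    exact absurd hfuel (by omega)
  | succ f ih =>
    intro marks hlen hfuel
    obtain ⟨c1, c2, c3, c4, c5, c6, c7⟩ :=
      pvPassFold (edges := edges) edges marks false (fun q h => h) hr hlen
    show ((pvClosure edges (f + 1) marks).length = n.toNat ∧
      (∀ i, pvSeen marks i → pvSeen (pvClosure edges (f + 1) marks) i) ∧ _ ∧ _)
    simp only [pvClosure]
    have hr_eq : pvPass edges marks = edges.foldl pvPassStep (marks, false) := rfl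
    by_cases hch : (pvPass edges marks).2 = true
    · rw [if_pos hch]
      have hTlt : pvT marks < pvT (pvPass edges marks).1 := by
        rcases c6 (hr_eq ▸ hch) with h | h
        · cases h
        · exact h
      have hTle : pvT (pvPass edges marks).1 ≤ n.toNat := by
        have := pvT_le (pvPass edges marks).1
        rw [hr_eq] at this ⊢
        omega
      obtain ⟨m0, m1, m2, m3⟩ := ih (pvPass edges marks).1 (hr_eq ▸ c1) (by omega)
      refine ⟨m0, fun i h => m1 i (c2 i h), m2, ?_⟩
      intro S hS hsub i h
      exact m3 S hS (fun j hj => c3 S hS hsub j hj) i h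
    · have hch' : (pvPass edges marks).2 = false := by simpa using hch
      rw [if_neg (by simp [hch'])]
      obtain ⟨heq, hiff⟩ := c7 (hr_eq ▸ hch')
      rw [hr_eq, heq]
      refine ⟨hlen, fun i h => h, ?_, fun S _ hsub i h => hsub i h⟩
      intro a b hab ha
      rcases hab with ⟨p, hp, ⟨h1, h2⟩ | ⟨h1, h2⟩⟩
      · exact h2 ▸ (hiff p hp).1 (h1 ▸ ha)
      · exact h1 ▸ (hiff p hp).2 (h2 ▸ ha)

-- ===== VERDICT (by name: the statement is the Claim_ definition above) =====
-- final assembly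
theorem is_simple_cycle_spec : Claim_equal_is_simple_cycle := by
  intro n edges _hdom hpre
  unfold Spec_is_simple_cycle
  unfold is_simple_cycle is_simple_cycle_alt
  by_cases hL : (edges.length : Int) ≠ n
  · rw [if_pos hL, if_pos hL]
  · rw [if_neg hL, if_neg hL]
    dsimp only
    have hlen : (edges.length : Int) = n := not_ne_iff.mp hL
    have hr : ∀ p ∈ edges, pvInR n p.1 ∧ pvInR n p.2 := by
      rcases hpre with h | h
      · exact absurd h hL
      · exact fun p hp => ⟨(h p hp).1, (h p hp).2⟩
    by_cases hD : (pvDeg n edges).any (fun d => decide (d ≠ 2)) = true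
    · rw [if_pos hD, if_pos hD]
    · rw [if_neg hD, if_neg hD]
      by_cases hn0 : n = 0
      · rw [if_pos hn0]
        unfold is_connected_undirected
        rw [if_pos hn0]
        rfl
      · rw [if_neg hn0]
        have hn : 0 ≤ n := hlen ▸ Int.natCast_nonneg edges.length
        have h0n : (0 : Int) < n := by omega
        have hNpos : 0 < n.toNat := by omega
        -- every vertex has degree 2
        have h2deg : ∀ i, i < n.toNat → (pvDeg n edges).getD i 0 = 2 := by
          intro i hi
          have hmem : (pvDeg n edges).getD i 0 ∈ pvDeg n edges := by
            rw [List.getD_eq_getElem?_getD,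
              List.getElem?_eq_getElem (by rw [pvDeg_length]; exact hi)]
            exact List.getElem_mem _
          have := (List.any_eq_false.mp (Bool.eq_false_iff.2 hD)) _ hmem
          simpa using this
        have hadjlen : ∀ i, i < n.toNat → ((pvAdj n edges).getD i []).length = 2 := by
          intro i hi
          have h1 := pvDegAdj hr i hi
          have h2 := h2deg i hi
          omega
        -- first node with a neighbour is node 0
        have hp0 : (fun i => decide (0 < (PySem.List.pyGetD (pvAdj n edges) i []).length)) 0
            = true := by
          dsimp only
          rw [pvGetD_norm _ _ (pvAdj_length n edges) ⟨by omega, h0n⟩, pvNorm_zero,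
            hadjlen 0 hNpos]
          rfl
        have hfind : (PySem.List.pyRange 0 n).find?
            (fun i => decide (0 < (PySem.List.pyGetD (pvAdj n edges) i []).length))
            = some 0 := by
          rw [PySem.List.pyRange_one_cons h0n]
          exact List.find?_cons_of_pos hp0
        simp only [is_connected_undirected, if_neg hn0, hfind]
        have hlenFalses : ((PySem.List.pyRange 0 n).map (fun _ => false)).length = n.toNat := by
          rw [List.length_map, pvLen_pyRange]
        have hset0 : PySem.List.pySetD ((PySem.List.pyRange 0 n).map (fun _ => false))
            (0 : Int) true
            = ((PySem.List.pyRange 0 n).map (fun _ => false)).set 0 true := by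
          rw [pvSetD_norm _ _ hlenFalses ⟨by omega, h0n⟩, pvNorm_zero]
        rw [hset0]
        set S0 := ((PySem.List.pyRange 0 n).map (fun _ => false)).set 0 true with hS0
        have hlen0 : S0.length = n.toNat := by rw [hS0, List.length_set]; exact hlenFalses
        have hTf : pvT ((PySem.List.pyRange 0 n).map (fun _ => false)) = 0 := by
          rw [pvT, List.count_eq_zero]
          simp
        have hT0 : pvT S0 = 1 := by
          rw [hS0, pvT_set_new (by omega) (pvFalses_getD n 0), hTf]
        have hSeen0 : ∀ i, pvSeen S0 i ↔ i = 0 := by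
          intro i
          constructor
          · intro h
            by_contra hne
            rw [pvSeen, hS0, pv_getD_set,
              if_neg (fun hc => hne hc.1.symm), pvFalses_getD] at h
            cases h
          · rintro rfl
            rw [pvSeen, hS0, pv_getD_set, if_pos ⟨rfl, by omega⟩]
        obtain ⟨d0, d1, d2, d3⟩ := pvDfs_main hr n.toNat S0 [0] hlen0
          (by
            intro u hu
            rw [List.mem_singleton] at hu
            subst hu
            exact ⟨⟨by omega, h0n⟩, by rw [pvNorm_zero]; exact (hSeen0 0).2 rfl⟩)
          (by
            intro a ha
            exact Or.inl ⟨0, List.mem_singleton.2 rfl,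
              by rw [pvNorm_zero]; exact ((hSeen0 a).1 ha).symm⟩)
          (by simp; omega)
        obtain ⟨c0, c1, c2, c3⟩ := pvClosure_main hr (n.toNat + 1) S0 hlen0 (by omega)
        -- the two reachable sets coincide
        have hAB : ∀ i, pvSeen (pvDfs (pvAdj n edges) n.toNat S0 [0]) i ↔
            pvSeen (pvClosure edges (n.toNat + 1) S0) i := by
          intro i
          constructor
          · exact fun h => d3 _ c2 (fun j hj => c1 j hj) i h
          · exact fun h => c3 _ d2 (fun j hj => d1 j hj) i h
        -- all adjacency lists are nonempty
        have hAdjAll : (PySem.List.pyRange 0 n).all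
            (fun i => decide (0 < (PySem.List.pyGetD (pvAdj n edges) i []).length)) = true := by
          rw [List.all_eq_true]
          intro i hi
          rw [PySem.List.mem_pyRange_one] at hi
          have hiR : pvInR n i := ⟨by omega, hi.2⟩
          rw [pvGetD_norm _ _ (pvAdj_length n edges) hiR,
            hadjlen (pvNorm n i) (pvNorm_lt hiR)]
          rfl
        rw [hAdjAll, Bool.true_and]
        rw [show ∀ b : Bool, (if !b then false else true) = b by decide]
        -- both "all marked" tests say: every index below n is reachable
        have hallA : ((PySem.List.pyRange 0 n).all
            (fun i => PySem.List.pyGetD (pvDfs (pvAdj n edges) n.toNat S0 [0]) i false) = true)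
            ↔ ∀ k, k < n.toNat → pvSeen (pvDfs (pvAdj n edges) n.toNat S0 [0]) k := by
          rw [List.all_eq_true]
          constructor
          · intro h k hk
            have hkR : pvInR n (k : Int) := ⟨by omega, by omega⟩
            have := h (k : Int) (PySem.List.mem_pyRange_one.2 ⟨by omega, by omega⟩)
            rw [pvGetD_norm _ _ d0 hkR] at this
            have hnk : pvNorm n (k : Int) = k := by unfold pvNorm; rw [if_neg (by omega)]; omega
            rw [hnk] at this
            exact this
          · intro h i hi
            rw [PySem.List.mem_pyRange_one] at hi
            have hiR : pvInR n i := ⟨by omega, hi.2⟩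
            rw [pvGetD_norm _ _ d0 hiR]
            exact h (pvNorm n i) (pvNorm_lt hiR)
        have hallB : ((pvClosure edges (n.toNat + 1) S0).all id = true)
            ↔ ∀ k, k < n.toNat → pvSeen (pvClosure edges (n.toNat + 1) S0) k := by
          rw [List.all_eq_true]
          constructor
          · intro h k hk
            rw [pvSeen, List.getD_eq_getElem?_getD,
              List.getElem?_eq_getElem (by rw [c0]; exact hk)]
            exact h _ (List.getElem_mem _)
          · intro h x hx
            obtain ⟨k, hk, rfl⟩ := List.mem_iff_getElem.1 hx
            have := h k (by rw [← c0]; exact hk)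
            rw [pvSeen, List.getD_eq_getElem?_getD, List.getElem?_eq_getElem hk] at this
            exact this
        have : (∀ k, k < n.toNat → pvSeen (pvDfs (pvAdj n edges) n.toNat S0 [0]) k)
            ↔ ∀ k, k < n.toNat → pvSeen (pvClosure edges (n.toNat + 1) S0) k := by
          constructor
          · exact fun h k hk => (hAB k).1 (h k hk)
          · exact fun h k hk => (hAB k).2 (h k hk)
        rw [Bool.eq_iff_iff, hallA, hallB]
        exact this
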